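-- pv_equiv track=rewrite | github.com/LukeCampbell3/NBA-Analytics | sports/mlb/scripts/generate_daily_prediction_pool.py | normalize_player_id
-- ===== SOURCE A (Python) =====
-- def normalize_player_id(player_name: str) -> str:
--     out = str(player_name).strip().lower()
--     for old, new in [
--         (" ", "_"),
--         (".", ""),
--         ("'", ""),
--         (",", ""),
--         ("/", "-"),
--         ("\\", "-"),
--         (":", ""),
--     ]:
--         out = out.replace(old, new)
--     return out
-- ===== SOURCE B (Python) =====
-- def normalize_player_id(player_name: str) -> str:
--     mapping = {" ": "_", ".": "", "'": "", ",": "", "/": "-", "\\": "-", ":": ""}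
--     return "".join(mapping.get(ch, ch) for ch in str(player_name).strip().lower())
-- ===== Notes on version B (the rewrite author's own statement) =====
-- stated objective: idiomatic
-- what changed: Replaced seven sequential full-string .replace() scans with one character-by-character pass over the stripped/lowered string using a lookup table (chars mapping to '' are deleted).
import Mathlib
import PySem

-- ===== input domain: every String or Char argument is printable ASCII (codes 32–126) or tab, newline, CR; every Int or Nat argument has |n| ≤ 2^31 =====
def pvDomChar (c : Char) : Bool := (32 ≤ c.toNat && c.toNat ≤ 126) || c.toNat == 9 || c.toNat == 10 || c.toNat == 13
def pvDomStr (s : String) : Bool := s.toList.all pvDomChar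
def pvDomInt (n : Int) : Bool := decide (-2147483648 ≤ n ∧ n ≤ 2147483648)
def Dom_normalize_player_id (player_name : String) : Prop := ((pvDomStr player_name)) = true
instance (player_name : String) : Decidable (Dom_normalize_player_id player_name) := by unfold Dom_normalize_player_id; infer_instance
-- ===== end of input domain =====

-- B replaces A's seven sequential full-string replace scans by a single character pass
-- with a lookup table (idiomatic; same result, proved equal on all inputs).

-- ===== PORT A =====
def normalize_player_id (player_name : String) : String :=
  let out := PySem.Str.lower (PySem.Str.strip player_name)
  [(" ", "_"), (".", ""), ("'", ""), (",", ""), ("/", "-"), ("\\", "-"), (":", "")].foldl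
    (fun out p => PySem.Str.replace out p.1 p.2) out

-- ===== PORT B =====
-- the dict literal `mapping` of Source B
def pvCharMap : PySem.Dict Char String :=
  PySem.Dict.mk [(' ', "_"), ('.', ""), ('\'', ""), (',', ""), ('/', "-"), ('\\', "-"), (':', "")]

def normalize_player_id_alt (player_name : String) : String :=
  PySem.Str.join ""
    ((PySem.Str.lower (PySem.Str.strip player_name)).toList.map
      (fun ch => pvCharMap.getD ch (String.ofList [ch])))

-- ===== PRECONDITION & SPEC =====
def Spec_normalize_player_id (player_name : String) (out : String) : Prop := out = normalize_player_id_alt player_name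
instance (player_name : String) (out : String) : Decidable (Spec_normalize_player_id player_name out) := by unfold Spec_normalize_player_id; infer_instance

-- ===== CLAIM (what is proved, stated in full; the proofs are below) =====
def Claim_equal_normalize_player_id : Prop := ∀ (player_name : String), Dom_normalize_player_id player_name → Spec_normalize_player_id player_name (normalize_player_id player_name)

-- ===== LEMMAS AND PROOFS =====

-- single-character replace is a flatMap over the characters
lemma replace_go_single (a : Char) (new : List Char) :
    ∀ (l acc : List Char),
      PySem.Chars.replace.go [a] new l.length l acc
        = acc.reverse ++ l.flatMap (fun c => if c == a then new else [c]) := by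
  intro l
  induction l with
  | nil => intro acc; simp [PySem.Chars.replace.go]
  | cons c t ih =>
      intro acc
      by_cases h : c = a
      · subst h
        simp [PySem.Chars.replace.go, List.isPrefixOf, ih]
      · have hba : (a == c) = false := by simp; exact fun hh => h hh.symm
        simp [PySem.Chars.replace.go, List.isPrefixOf, hba, ih, h]

lemma replace_single (a : Char) (new s : List Char) :
    PySem.Chars.replace s [a] new = s.flatMap (fun c => if c == a then new else [c]) := by
  simp [PySem.Chars.replace, replace_go_single]

-- ===== VERDICT (by name: the statement is the Claim_ definition above) =====
-- "".join with empty separator is concatenation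
lemma join_empty (parts : List (List Char)) : PySem.Chars.join [] parts = parts.flatten := by
  induction parts with
  | nil => rfl
  | cons h t ih =>
      cases t with
      | nil => simp [PySem.Chars.join, List.intercalate]
      | cons h2 t2 =>
          simp only [PySem.Chars.join, List.intercalate, List.intersperse, List.flatten_cons,
            List.flatten] at *
          simp_all

theorem normalize_player_id_spec : Claim_equal_normalize_player_id := by
  intro p _
  unfold Spec_normalize_player_id
  have h : (normalize_player_id p).toList = (normalize_player_id_alt p).toList := by
    unfold normalize_player_id normalize_player_id_alt
    simp only [List.foldl, PySem.Str.toList_replace, PySem.Str.toList_join]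
    have e1 : (" " : String).toList = [' '] := by decide
    have e2 : ("_" : String).toList = ['_'] := by decide
    have e3 : ("." : String).toList = ['.'] := by decide
    have e4 : ("" : String).toList = [] := by decide
    have e5 : ("'" : String).toList = ['\''] := by decide
    have e6 : ("," : String).toList = [','] := by decide
    have e7 : ("/" : String).toList = ['/'] := by decide
    have e8 : ("-" : String).toList = ['-'] := by decide
    have e9 : ("\\" : String).toList = ['\\'] := by decide
    have e10 : (":" : String).toList = [':'] := by decide
    rw [e1, e2, e3, e4, e5, e6, e7, e8, e9, e10, join_empty]
    simp only [replace_single, List.flatMap_assoc, List.map_map, ← List.flatMap_def]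
    congr 1
    funext c
    by_cases h1 : c = ' '
    · subst h1; decide
    by_cases h2 : c = '.'
    · subst h2; decide
    by_cases h3 : c = '\''
    · subst h3; decide
    by_cases h4 : c = ','
    · subst h4; decide
    by_cases h5 : c = '/'
    · subst h5; decide
    by_cases h6 : c = '\\'
    · subst h6; decide
    by_cases h7 : c = ':'
    · subst h7; decide
    simp [pvCharMap, PySem.Dict.getD, PySem.Dict.get?, List.find?, h1, h2, h3, h4, h5, h6, h7,
      beq_eq_false_iff_ne.mpr (Ne.symm h1), beq_eq_false_iff_ne.mpr (Ne.symm h2),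
      beq_eq_false_iff_ne.mpr (Ne.symm h3), beq_eq_false_iff_ne.mpr (Ne.symm h4),
      beq_eq_false_iff_ne.mpr (Ne.symm h5), beq_eq_false_iff_ne.mpr (Ne.symm h6),
      beq_eq_false_iff_ne.mpr (Ne.symm h7)]
  have h2 := congrArg String.ofList h
  simpa using h2
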